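-- pv_equiv track=rewrite | github.com/Ayaz9/Python_Scripts | game_players.py | per_user_game
-- ===== SOURCE A (Python) =====
-- def per_user_game(plyr_list):
--     games = []
--     m = 1
--     while m < len(plyr_list):
--         if plyr_list[m]:
--             games.append(f'{plyr_list[0]}-{plyr_list[m]}')
--         else:
--             break
--         m += 1
--     return games
-- ===== SOURCE B (Python) =====
-- def per_user_game(plyr_list):
--     tail = plyr_list[1:]
--     try:
--         stop = tail.index('')
--     except ValueError:
--         stop = len(tail)
--     return [f'{plyr_list[0]}-{p}' for p in tail[:stop]]
-- ===== Notes on version B (the rewrite author's own statement) =====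
-- stated objective: alternative
-- what changed: Instead of scanning elements with a truthiness test and breaking, B locates the cut point by searching the tail for the first empty string with list.index, slices the tail up to that point, and formats the slice.
import Mathlib
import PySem

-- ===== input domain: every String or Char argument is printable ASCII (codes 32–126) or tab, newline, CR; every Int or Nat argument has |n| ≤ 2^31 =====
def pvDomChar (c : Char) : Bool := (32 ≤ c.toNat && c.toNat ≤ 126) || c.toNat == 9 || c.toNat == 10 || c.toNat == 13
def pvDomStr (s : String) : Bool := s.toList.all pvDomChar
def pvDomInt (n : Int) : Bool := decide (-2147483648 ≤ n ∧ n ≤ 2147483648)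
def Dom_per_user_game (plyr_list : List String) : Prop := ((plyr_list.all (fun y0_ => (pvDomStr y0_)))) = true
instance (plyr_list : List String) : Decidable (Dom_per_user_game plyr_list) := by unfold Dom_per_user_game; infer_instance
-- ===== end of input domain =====

-- B finds the cut point by searching the tail for the first empty string (list.index), then slices and formats; alternative decomposition, same cost.

-- ===== PORT A =====
-- while loop of A: recursion on index m with accumulator games
def pvAWhile (plyr_list : List String) (games : List String) (m : Nat) : List String :=
  if h : m < plyr_list.length then
    if plyr_list.get ⟨m, h⟩ ≠ "" then
      pvAWhile plyr_list (games ++ [plyr_list.headD "" ++ "-" ++ plyr_list.get ⟨m, h⟩]) (m + 1)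
    else games
  else games
termination_by plyr_list.length - m

def per_user_game (plyr_list : List String) : List String :=
  pvAWhile plyr_list [] 1

-- ===== PORT B =====
def per_user_game_alt (plyr_list : List String) : List String :=
  let tail := PySem.List.slice plyr_list (some 1) none
  let stop : Nat := (PySem.List.index? tail "").getD tail.length
  (PySem.List.slice tail none (some (stop : Int))).map
    (fun p => plyr_list.headD "" ++ "-" ++ p)

-- ===== PRECONDITION & SPEC =====
def Spec_per_user_game (plyr_list : List String) (out : List String) : Prop := out = per_user_game_alt plyr_list
instance (plyr_list : List String) (out : List String) : Decidable (Spec_per_user_game plyr_list out) := by unfold Spec_per_user_game; infer_instance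

-- ===== CLAIM (what is proved, stated in full; the proofs are below) =====
def Claim_equal_per_user_game : Prop := ∀ (plyr_list : List String), Dom_per_user_game plyr_list → Spec_per_user_game plyr_list (per_user_game plyr_list)

-- ===== LEMMAS AND PROOFS =====
theorem pvAWhile_eq (plyr_list : List String) : ∀ m games,
    pvAWhile plyr_list games m =
      games ++ ((plyr_list.drop m).takeWhile (fun x => x ≠ "")).map
        (fun x => plyr_list.headD "" ++ "-" ++ x) := by
  intro m
  induction' hk : plyr_list.length - m with k ih generalizing m
  · intro games
    have hm : ¬ m < plyr_list.length := by omega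
    have hd : plyr_list.drop m = [] := List.drop_eq_nil_of_le (by omega)
    rw [pvAWhile]
    simp [hm, hd]
  · intro games
    have hm : m < plyr_list.length := by omega
    have hdrop : plyr_list.drop m = plyr_list.get ⟨m, hm⟩ :: plyr_list.drop (m + 1) := by
      rw [List.drop_eq_getElem_cons hm]; rfl
    rw [pvAWhile]
    by_cases he : plyr_list.get ⟨m, hm⟩ = ""
    <;> simp only [List.get_eq_getElem] at he
    · simp only [hm, dif_pos]
      rw [if_neg (by simp [he]), hdrop]
      simp [List.takeWhile, he]
    · have := ih (m + 1) (by omega)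
      simp only [hm, dif_pos]
      rw [if_pos (by simpa using he), this, hdrop]
      simp [List.takeWhile, he]

-- cut-point search equals the truthy-prefix scan
theorem take_idxOf_eq_takeWhile (t : List String) :
    t.take ((PySem.List.index? t "").getD t.length) = t.takeWhile (fun x => x ≠ "") := by
  induction t with
  | nil => simp
  | cons x xs ih =>
    by_cases hx : x = ""
    · subst hx
      rw [PySem.List.index?_cons_self]
      simp [List.takeWhile]
    · rw [PySem.List.index?_cons_of_ne xs hx]
      cases h : PySem.List.index? xs "" with
      | none =>
        rw [h] at ih
        simp only [Option.map_none, Option.getD_none, List.length_cons]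
        simpa [List.takeWhile, hx] using ih
      | some k =>
        rw [h] at ih
        simp only [Option.map_some, Option.getD_some] at ih ⊢
        simpa [List.takeWhile, hx] using ih

-- ===== VERDICT (by name: the statement is the Claim_ definition above) =====
theorem per_user_game_spec : Claim_equal_per_user_game := by
  intro l _
  unfold Spec_per_user_game per_user_game per_user_game_alt
  rw [pvAWhile_eq]
  simp only [PySem.List.slice_from_one, PySem.List.slice_to_natCast]
  rw [take_idxOf_eq_takeWhile]
  simp [List.drop_one]
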